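-- pv_equiv track=rewrite | github.com/xpheal/laser_sequencer | laser_sequencer.py | generate_sequence_helper
-- ===== SOURCE A (Python) =====
-- def neighbor(x, y):
-- 	relative_position = [(0,1), (0,-1), (1,0), (-1,0)]
--
-- 	for pos in relative_position:
-- 		if x[0] + pos[0] == y[0] and x[1] + pos[1] == y[1]:
-- 			return True
--
-- 	return False
--
-- def generate_sequence_helper(seq, arr):
-- 	if not seq:
-- 		return arr
--
-- 	for i in range(len(seq)):
-- 		if neighbor(seq[i], arr[-1]):
-- 			continue
-- 		else:
-- 			res = generate_sequence_helper(seq[:i] + seq[i+1:], arr + [seq[i]])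
--
-- 			if res:
-- 				return res
--
-- 	return None
-- ===== SOURCE B (Python) =====
-- # B: iterative DFS with an explicit stack of (remaining, current) states
-- # instead of A's recursion with early return; same first-found ordering.
-- def neighbor(x, y):
--     return abs(x[0] - y[0]) + abs(x[1] - y[1]) == 1
--
-- def generate_sequence_helper(seq, arr):
--     stack = [(seq, arr)]
--     while stack:
--         rem, cur = stack.pop()
--         if not rem:
--             return cur
--         last = cur[-1]
--         children = [(rem[:i] + rem[i+1:], cur + [rem[i]])
--                     for i in range(len(rem)) if not neighbor(rem[i], last)]
--         stack.extend(reversed(children))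
--     return None
-- ===== Notes on version B (the rewrite author's own statement) =====
-- stated objective: alternative
-- what changed: Replaced A's recursive backtracking with early returns by an iterative depth-first search over an explicit stack of (remaining, current) states (children pushed so the lowest index is explored first), and the neighbor test by a Manhattan-distance-1 check.
import Mathlib
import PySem

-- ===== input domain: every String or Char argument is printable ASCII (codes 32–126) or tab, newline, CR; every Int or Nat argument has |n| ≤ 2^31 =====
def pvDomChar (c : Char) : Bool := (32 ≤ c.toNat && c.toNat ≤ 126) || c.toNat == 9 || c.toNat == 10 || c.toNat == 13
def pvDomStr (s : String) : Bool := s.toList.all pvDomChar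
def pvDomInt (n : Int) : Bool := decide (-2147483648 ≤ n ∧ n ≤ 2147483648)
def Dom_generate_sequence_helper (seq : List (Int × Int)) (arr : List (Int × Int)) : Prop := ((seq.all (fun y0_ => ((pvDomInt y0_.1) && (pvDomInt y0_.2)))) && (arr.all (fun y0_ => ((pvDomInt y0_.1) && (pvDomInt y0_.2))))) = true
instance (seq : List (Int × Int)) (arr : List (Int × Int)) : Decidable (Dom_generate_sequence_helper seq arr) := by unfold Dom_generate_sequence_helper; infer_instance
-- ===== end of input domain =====

-- B replaces A's recursive backtracking with early returns by an iterative DFS over an explicit stack of (remaining, current) states; return values proved equal on Pre_.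

-- ===== PORT A =====
-- helper: Python's neighbor(x, y), the loop over the four relative positions
def neighbor_ (x : Int × Int) (y : Int × Int) : Bool :=
  [((0:Int),(1:Int)), (0,-1), (1,0), (-1,0)].any
    (fun pos => x.1 + pos.1 == y.1 && x.2 + pos.2 == y.2)

-- A's body: base case, then the 'for i in range(len(seq))' loop as index recursion (goA)
mutual
def generate_sequence_helper (seq : List (Int × Int)) (arr : List (Int × Int)) : Option (List (Int × Int)) :=
  if seq.isEmpty then some arr
  else goA seq arr 0
termination_by (seq.length, seq.length + 1)
decreasing_by exact Prod.Lex.right _ (by omega)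

def goA (seq : List (Int × Int)) (arr : List (Int × Int)) (i : Nat) : Option (List (Int × Int)) :=
  if _h : i < seq.length then
    let si := PySem.List.pyGetD seq (i : Int) (0, 0)
    if neighbor_ si (PySem.List.pyGetD arr (-1) (0, 0)) then goA seq arr (i + 1)
    else
      match generate_sequence_helper
              (PySem.List.slice seq none (some (i : Int)) ++
               PySem.List.slice seq (some ((i : Int) + 1)) none)
              (arr ++ [si]) with
      | some res => if res.isEmpty then goA seq arr (i + 1) else some res   -- 'if res:' truthiness
      | none => goA seq arr (i + 1)
  else none
termination_by (seq.length, seq.length - i)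
decreasing_by
  · exact Prod.Lex.right _ (by omega)
  · refine Prod.Lex.left _ _ ?_
    rw [PySem.List.slice_to_natCast, show ((i:Int)+1) = ((i+1:Nat):Int) from by push_cast; ring,
       PySem.List.slice_from_natCast]
    simp
    omega
  · exact Prod.Lex.right _ (by omega)
end

-- ===== PORT B =====
-- helper: Source B's neighbor, the Manhattan-distance-1 test
def neighbor_alt (x : Int × Int) (y : Int × Int) : Bool :=
  (x.1 - y.1).natAbs + (x.2 - y.2).natAbs == 1

-- Source B's list comprehension building the child states of one popped state
def childrenOf (rem : List (Int × Int)) (cur : List (Int × Int)) :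
    List (List (Int × Int) × List (Int × Int)) :=
  let last := PySem.List.pyGetD cur (-1) (0, 0)
  (List.range rem.length).filterMap (fun (i : Nat) =>
    let ri := PySem.List.pyGetD rem (i : Int) (0, 0)
    if neighbor_alt ri last then none
    else some (PySem.List.slice rem none (some (i : Int)) ++
               PySem.List.slice rem (some ((i : Int) + 1)) none,
               cur ++ [ri]))

-- termination measure for the stack loop: Σ over the stack of (|remaining| + 1)!
def pvMu (s : List (List (Int × Int) × List (Int × Int))) : Nat :=
  (s.map (fun p => Nat.factorial (p.1.length + 1))).sum

theorem childrenOf_weight {rem cur : List (Int × Int)} {c : List (Int × Int) × List (Int × Int)}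
    (hc : c ∈ childrenOf rem cur) : c.1.length + 1 = rem.length := by
  rw [childrenOf, List.mem_filterMap] at hc
  obtain ⟨i, hi, hc⟩ := hc
  rw [List.mem_range] at hi
  dsimp only at hc
  split at hc
  · exact absurd hc (by simp)
  · simp only [Option.some.injEq] at hc
    subst hc
    show (PySem.List.slice rem none (some (i:Int)) ++
        PySem.List.slice rem (some ((i:Int)+1)) none).length + 1 = rem.length
    rw [PySem.List.slice_to_natCast, show ((i:Int)+1) = ((i+1:Nat):Int) from by push_cast; ring,
       PySem.List.slice_from_natCast]
    simp
    omega

theorem pvMu_children_lt (rem cur : List (Int × Int))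
    (rest : List (List (Int × Int) × List (Int × Int)))
    : pvMu (childrenOf rem cur ++ rest) < pvMu ((rem, cur) :: rest) := by
  simp only [pvMu, List.map_append, List.sum_append, List.map_cons, List.sum_cons]
  have h1 : ((childrenOf rem cur).map (fun p => Nat.factorial (p.1.length + 1))).sum
      ≤ (childrenOf rem cur).length * Nat.factorial rem.length := by
    have := List.sum_le_card_nsmul
      ((childrenOf rem cur).map (fun p => Nat.factorial (p.1.length + 1)))
      (Nat.factorial rem.length) ?_
    · simpa [smul_eq_mul] using this
    · intro x hx
      obtain ⟨c, hc, rfl⟩ := List.mem_map.mp hx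
      rw [childrenOf_weight hc]
  have h2 : (childrenOf rem cur).length ≤ rem.length := by
    rw [childrenOf]
    calc (List.filterMap _ (List.range rem.length)).length
        ≤ (List.range rem.length).length := List.length_filterMap_le _ _
      _ = rem.length := List.length_range
  have h3 : rem.length * Nat.factorial rem.length < Nat.factorial (rem.length + 1) := by
    rw [Nat.factorial_succ]
    exact Nat.mul_lt_mul_of_lt_of_le (by omega) (le_refl _) (Nat.factorial_pos _)
  have h4 : (childrenOf rem cur).length * Nat.factorial rem.length
      ≤ rem.length * Nat.factorial rem.length := Nat.mul_le_mul_right _ h2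
  omega

-- Source B's while loop over the explicit stack (list head = top of stack; children pushed so the lowest index is popped first)
def runStack : List (List (Int × Int) × List (Int × Int)) → Option (List (Int × Int))
  | [] => none
  | (rem, cur) :: rest =>
    if rem.isEmpty then some cur
    else runStack (childrenOf rem cur ++ rest)
termination_by s => pvMu s
decreasing_by
  exact pvMu_children_lt rem cur rest

def generate_sequence_helper_alt (seq : List (Int × Int)) (arr : List (Int × Int)) :
    Option (List (Int × Int)) :=
  runStack [(seq, arr)]

-- ===== PRECONDITION & SPEC =====
-- Pre_ excludes exactly the inputs on which Python A raises IndexError: arr empty while seq is non-empty (arr[-1] is read immediately).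
def Pre_generate_sequence_helper (seq : List (Int × Int)) (arr : List (Int × Int)) : Prop :=
  seq = [] ∨ arr ≠ []
instance (seq : List (Int × Int)) (arr : List (Int × Int)) : Decidable (Pre_generate_sequence_helper seq arr) := by unfold Pre_generate_sequence_helper; infer_instance
def pvWitness_generate_sequence_helper : (List (Int × Int)) × (List (Int × Int)) :=
  ([(0, 0), (2, 2)], [(5, 5)])

def Spec_generate_sequence_helper (seq : List (Int × Int)) (arr : List (Int × Int)) (out : Option (List (Int × Int))) : Prop := out = generate_sequence_helper_alt seq arr
instance (seq : List (Int × Int)) (arr : List (Int × Int)) (out : Option (List (Int × Int))) : Decidable (Spec_generate_sequence_helper seq arr out) := by unfold Spec_generate_sequence_helper; infer_instance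

-- ===== CLAIM (what is proved, stated in full; the proofs are below) =====
def Claim_equal_generate_sequence_helper : Prop := ∀ (seq : List (Int × Int)) (arr : List (Int × Int)), Dom_generate_sequence_helper seq arr → Pre_generate_sequence_helper seq arr → Spec_generate_sequence_helper seq arr (generate_sequence_helper seq arr)

-- ===== LEMMAS AND PROOFS =====

-- the two neighbor tests agree
theorem neighbor_eq (x y : Int × Int) : neighbor_ x y = neighbor_alt x y := by
  simp only [neighbor_, neighbor_alt, List.any_cons, List.any_nil, Bool.or_false]
  rw [Bool.eq_iff_iff]
  simp only [Bool.or_eq_true, Bool.and_eq_true, beq_iff_eq]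
  omega

-- any result of A extends the accumulator arr
theorem goA_prefix (N : Nat)
    (ih : ∀ seq arr : List (Int × Int), seq.length ≤ N →
      ∀ r, generate_sequence_helper seq arr = some r → ∃ t, r = arr ++ t) :
    ∀ (k : Nat) (seq arr : List (Int × Int)) (i : Nat), seq.length ≤ N + 1 →
      seq.length - i ≤ k → ∀ r, goA seq arr i = some r → ∃ t, r = arr ++ t := by
  intro k
  induction k with
  | zero =>
    intro seq arr i hN hk r hr
    rw [goA] at hr
    rw [dif_neg (by omega)] at hr
    exact absurd hr (by simp)
  | succ k ihk =>
    intro seq arr i hN hk r hr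
    rw [goA] at hr
    by_cases hi : i < seq.length
    · rw [dif_pos hi] at hr
      dsimp only at hr
      split at hr
      · exact ihk seq arr (i+1) hN (by omega) r hr
      · split at hr
        next res hres =>
          split at hr
          · exact ihk seq arr (i+1) hN (by omega) r hr
          · -- some res returned
            have hlen : (PySem.List.slice seq none (some (i:Int)) ++
                PySem.List.slice seq (some ((i:Int)+1)) none).length ≤ N := by
              rw [PySem.List.slice_to_natCast,
                 show ((i:Int)+1) = ((i+1:Nat):Int) from by push_cast; ring,
                 PySem.List.slice_from_natCast]
              simp
              omega
            obtain ⟨t, ht⟩ := ih _ _ hlen res hres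
            simp only [Option.some.injEq] at hr
            subst hr
            exact ⟨[PySem.List.pyGetD seq (i:Int) (0,0)] ++ t, by rw [ht, List.append_assoc]⟩
        next hres => exact ihk seq arr (i+1) hN (by omega) r hr
    · rw [dif_neg hi] at hr
      exact absurd hr (by simp)

theorem gsh_prefix : ∀ (N : Nat) (seq arr : List (Int × Int)), seq.length ≤ N →
    ∀ r, generate_sequence_helper seq arr = some r → ∃ t, r = arr ++ t := by
  intro N
  induction N with
  | zero =>
    intro seq arr hN r hr
    have : seq = [] := List.eq_nil_of_length_eq_zero (by omega)
    subst this
    rw [generate_sequence_helper] at hr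
    simp at hr
    exact ⟨[], by simp [hr.symm]⟩
  | succ N ihN =>
    intro seq arr hN r hr
    rw [generate_sequence_helper] at hr
    split at hr
    · simp only [Option.some.injEq] at hr
      exact ⟨[], by simp [hr.symm]⟩
    · exact goA_prefix N ihN seq.length seq arr 0 hN (by omega) r hr

-- DFS splits over the stack: the part below is reached only when the part above is exhausted
theorem runStack_append : ∀ (n : Nat) (s t : List (List (Int × Int) × List (Int × Int))),
    pvMu s ≤ n → runStack (s ++ t) = (runStack s).or (runStack t) := by
  intro n
  induction n with
  | zero =>
    intro s t hs
    match s with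
    | [] => simp [runStack]
    | (rem, cur) :: s' =>
      exfalso
      have : 1 ≤ Nat.factorial (rem.length + 1) := Nat.factorial_pos _
      simp [pvMu] at hs
      omega
  | succ n ihn =>
    intro s t hs
    match s with
    | [] => simp [runStack]
    | (rem, cur) :: s' =>
      by_cases hrem : rem.isEmpty
      · rw [List.cons_append, runStack, if_pos hrem, runStack, if_pos hrem]
        simp
      · have hlt := pvMu_children_lt rem cur s'
        rw [List.cons_append, runStack, if_neg hrem, ← List.append_assoc,
           ihn (childrenOf rem cur ++ s') t (by omega)]
        conv_rhs => rw [runStack, if_neg hrem]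

-- the children of one state, from index i upwards
def childrenFrom (rem cur : List (Int × Int)) (i : Nat) :
    List (List (Int × Int) × List (Int × Int)) :=
  (List.range' i (rem.length - i)).filterMap (fun (j : Nat) =>
    let rj := PySem.List.pyGetD rem (j : Int) (0, 0)
    if neighbor_alt rj (PySem.List.pyGetD cur (-1) (0, 0)) then none
    else some (PySem.List.slice rem none (some (j : Int)) ++
               PySem.List.slice rem (some ((j : Int) + 1)) none,
               cur ++ [rj]))

theorem childrenFrom_zero (rem cur : List (Int × Int)) :
    childrenFrom rem cur 0 = childrenOf rem cur := by
  rw [childrenFrom, childrenOf, List.range_eq_range']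
  simp

theorem goA_run (N : Nat)
    (ih : ∀ seq arr : List (Int × Int), seq.length ≤ N →
      runStack [(seq, arr)] = generate_sequence_helper seq arr) :
    ∀ (k : Nat) (seq arr : List (Int × Int)) (i : Nat), seq.length ≤ N + 1 →
      seq.length - i ≤ k → runStack (childrenFrom seq arr i) = goA seq arr i := by
  intro k
  induction k with
  | zero =>
    intro seq arr i hN hk
    rw [childrenFrom, show seq.length - i = 0 from by omega]
    rw [goA, dif_neg (by omega)]
    simp [runStack]
  | succ k ihk =>
    intro seq arr i hN hk
    by_cases hi : i < seq.length
    · rw [childrenFrom, show seq.length - i = (seq.length - (i+1)) + 1 from by omega,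
         List.range'_succ, List.filterMap_cons]
      rw [goA, dif_pos hi]
      dsimp only
      rw [neighbor_eq]
      by_cases hnb : neighbor_alt (PySem.List.pyGetD seq (i:Int) (0,0))
          (PySem.List.pyGetD arr (-1) (0,0))
      · rw [if_pos hnb, if_pos hnb]
        exact ihk seq arr (i+1) hN (by omega)
      · rw [if_neg hnb, if_neg hnb]
        have hrest : runStack (childrenFrom seq arr (i+1)) = goA seq arr (i+1) :=
          ihk seq arr (i+1) hN (by omega)
        have hsplit := runStack_append (pvMu [(PySem.List.slice seq none (some (i:Int)) ++
            PySem.List.slice seq (some ((i:Int)+1)) none, arr ++ [PySem.List.pyGetD seq (i:Int) (0,0)])])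
          [(PySem.List.slice seq none (some (i:Int)) ++
            PySem.List.slice seq (some ((i:Int)+1)) none, arr ++ [PySem.List.pyGetD seq (i:Int) (0,0)])]
          (childrenFrom seq arr (i+1)) (le_refl _)
        rw [List.singleton_append] at hsplit
        rw [childrenFrom] at hsplit
        rw [hsplit]
        have hlen : (PySem.List.slice seq none (some (i:Int)) ++
            PySem.List.slice seq (some ((i:Int)+1)) none).length ≤ N := by
          rw [PySem.List.slice_to_natCast,
             show ((i:Int)+1) = ((i+1:Nat):Int) from by push_cast; ring,
             PySem.List.slice_from_natCast]
          simp
          omega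
        rw [ih _ _ hlen]
        rw [childrenFrom] at hrest
        cases hres : generate_sequence_helper
            (PySem.List.slice seq none (some (i:Int)) ++
             PySem.List.slice seq (some ((i:Int)+1)) none)
            (arr ++ [PySem.List.pyGetD seq (i:Int) (0,0)]) with
        | none => simpa using hrest
        | some res =>
          have hne : res.isEmpty = false := by
            obtain ⟨t, ht⟩ := gsh_prefix ((PySem.List.slice seq none (some (i:Int)) ++
              PySem.List.slice seq (some ((i:Int)+1)) none).length) _ _ (le_refl _) res hres
            subst ht
            simp
          simp [hne]
    · rw [childrenFrom, show seq.length - i = 0 from by omega]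
      rw [goA, dif_neg (by omega)]
      simp [runStack]

theorem main_equiv : ∀ (N : Nat) (seq arr : List (Int × Int)), seq.length ≤ N →
    runStack [(seq, arr)] = generate_sequence_helper seq arr := by
  intro N
  induction N with
  | zero =>
    intro seq arr hN
    have : seq = [] := List.eq_nil_of_length_eq_zero (by omega)
    subst this
    rw [runStack, generate_sequence_helper]
    simp
  | succ N ihN =>
    intro seq arr hN
    by_cases hemp : seq.isEmpty
    · rw [runStack, if_pos hemp, generate_sequence_helper, if_pos hemp]
    · rw [runStack, if_neg hemp, List.append_nil, ← childrenFrom_zero,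
         generate_sequence_helper, if_neg hemp]
      exact goA_run N ihN seq.length seq arr 0 hN (by omega)

-- ===== VERDICT (by name: the statement is the Claim_ definition above) =====
theorem generate_sequence_helper_spec : Claim_equal_generate_sequence_helper := by
  intro seq arr _ _
  exact (main_equiv seq.length seq arr (le_refl _)).symm
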